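-- pv_equiv track=rewrite | github.com/ahotadotdashmeredith/Segment_Automation | Calls/gettingCalls.py | gettingEventCalls
-- ===== SOURCE A (Python) =====
-- def formattingGaCalls(gaCalls):
--     # dict that will contain all events captured from network calls in event-list type format
--     fmGaCalls = {'pageview': []}
--     for i in gaCalls:
--         try:
--             if (i['t'] == ['event']):
--                 fmGaCalls[i['ec'][0]] = []
--         except:
--             pass
--     return fmGaCalls
--
-- def adddingGaCalls(gaCalls):
--     fmGaCalls = formattingGaCalls(gaCalls)
--     pageDone = False
--     for i in gaCalls:
--         try:
--             if (i['t'] == ['pageview'] and pageDone is False):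
--                 fmGaCalls.get('pageview').append(i)
--                 pageDone = True
--             elif (i['t'] == ['event']):
--                 fmGaCalls.get(i['ec'][0]).append(i)
--         except:
--             pass
--     return fmGaCalls
--
-- def takingImportantProperties(organizedNetworkCalls, inputEvent, inputEventPropertiesObj):
--     # this list will be the value to each event in eventCalls dict
--     tempEventList = []
--     # Looping through all the properties of an input parameter
--     for i in organizedNetworkCalls[inputEvent]:
--         # this object will store the value of necessary properties only for each input event
--         tempPropertiesObj = {}
--         for property in inputEventPropertiesObj:
--             try:
--                 tempPropertiesObj[property] = i[property]
--             except:
--                 tempPropertiesObj[property] = ['NA']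
--         # In the end, this will contain objects with necessary properties only
--         tempEventList.append(tempPropertiesObj)
--     return tempEventList
--
-- def gettingEventCalls(gaCalls, inputData):
--     organizedNetworkCalls = adddingGaCalls(gaCalls)
--     # dict containing all events that we want to validate i.e. user entered in input file, in the same event type format
--     eventCalls = {}
--     # for each event in input
--     for inputEvent, inputEventPropertiesObj in inputData.items():
--         # Code for checking if desired event was captured or not
--         try:
--             for i in organizedNetworkCalls[inputEvent]:
--                 pass
--         # If the desired event was not captured
--         except:
--             organizedNetworkCalls[inputEvent] = []
--         # Storing the list in eventCall dict
--         eventCalls[inputEvent] = takingImportantProperties(organizedNetworkCalls, inputEvent, inputEventPropertiesObj)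
--     return eventCalls
-- ===== SOURCE B (Python) =====
-- def gettingEventCalls(gaCalls, inputData):
--     eventCalls = {}
--     for inputEvent, inputEventPropertiesObj in inputData.items():
--         matched = []
--         pageUsed = False
--         for call in gaCalls:
--             ok = False
--             try:
--                 if call['t'] == ['event'] and call['ec'][0] == inputEvent:
--                     ok = True
--             except Exception:
--                 pass
--             if not ok and inputEvent == 'pageview' and not pageUsed:
--                 try:
--                     if call['t'] == ['pageview']:
--                         ok = True
--                         pageUsed = True
--                 except Exception:
--                     pass
--             if ok:
--                 row = {}
--                 for prop in inputEventPropertiesObj: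
--                     try:
--                         row[prop] = call[prop]
--                     except Exception:
--                         row[prop] = ['NA']
--                 matched.append(row)
--         eventCalls[inputEvent] = matched
--     return eventCalls
-- ===== Notes on version B (the rewrite author's own statement) =====
-- stated objective: simpler
-- what changed: B drops A's two-stage grouping (formattingGaCalls building an index of empty lists per event category, then adddingGaCalls filling it) and instead, per requested input event, does one direct scan of gaCalls collecting matching calls (event calls with ec[0]==inputEvent, plus the first pageview-typed call when inputEvent=='pageview') and builds the property rows inline.
import Mathlib
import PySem

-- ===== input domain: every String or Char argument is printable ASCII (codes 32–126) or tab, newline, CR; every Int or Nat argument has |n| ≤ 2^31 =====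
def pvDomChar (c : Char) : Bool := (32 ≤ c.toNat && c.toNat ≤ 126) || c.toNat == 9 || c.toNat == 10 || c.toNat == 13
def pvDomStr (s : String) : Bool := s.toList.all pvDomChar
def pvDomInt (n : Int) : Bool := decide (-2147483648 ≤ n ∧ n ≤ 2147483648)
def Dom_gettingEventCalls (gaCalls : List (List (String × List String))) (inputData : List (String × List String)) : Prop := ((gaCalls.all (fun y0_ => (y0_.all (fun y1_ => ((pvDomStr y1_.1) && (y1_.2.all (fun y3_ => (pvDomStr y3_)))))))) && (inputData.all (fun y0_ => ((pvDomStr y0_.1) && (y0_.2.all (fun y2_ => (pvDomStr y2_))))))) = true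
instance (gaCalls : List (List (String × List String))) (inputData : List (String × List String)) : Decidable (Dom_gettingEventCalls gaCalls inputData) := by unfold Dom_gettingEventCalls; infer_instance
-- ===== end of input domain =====

-- B replaces A's two-stage category-index construction (formatting + adding) by one direct
-- matching scan of gaCalls per requested input event (objective: simpler).

-- ===== PORT A =====

-- i[k] on a call dict (raw assoc list viewed as a Python dict; first-match lookup)
def pvDictGet (i : List (String × List String)) (k : String) : Option (List String) :=
  (PySem.Dict.mk i).get? k

-- every `try: ... except: pass` of A is ported by taking the unchanged-state branch at
-- exactly the lookups where Python raises (pvDictGet/pyGet?/Dict.get? returning none).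

-- loop body of formattingGaCalls
def pvFmtStep (fm : PySem.Dict String (List (List (String × List String))))
    (i : List (String × List String)) : PySem.Dict String (List (List (String × List String))) :=
  match pvDictGet i "t" with
  | none => fm                                  -- KeyError on i['t'], caught
  | some t =>
    if t = ["event"] then
      match pvDictGet i "ec" with
      | none => fm                              -- KeyError on i['ec'], caught
      | some ec =>
        match PySem.List.pyGet? ec 0 with
        | none => fm                            -- IndexError on i['ec'][0], caught
        | some e0 => fm.insert e0 []
    else fm

def pvFormattingGaCalls (gaCalls : List (List (String × List String))) :
    PySem.Dict String (List (List (String × List String))) :=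
  gaCalls.foldl pvFmtStep (PySem.Dict.ofList [("pageview", [])])

-- loop body of adddingGaCalls; state = (fmGaCalls, pageDone)
def pvAddStep (s : PySem.Dict String (List (List (String × List String))) × Bool)
    (i : List (String × List String)) :
    PySem.Dict String (List (List (String × List String))) × Bool :=
  match pvDictGet i "t" with
  | none => s                                   -- KeyError on i['t'], caught
  | some t =>
    if t = ["pageview"] ∧ s.2 = false then
      match s.1.get? "pageview" with
      | none => s                               -- .get → None, None.append raises, caught
      | some l => (s.1.insert "pageview" (l ++ [i]), true)
    else if t = ["event"] then
      match pvDictGet i "ec" with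
      | none => s                               -- KeyError on i['ec'], caught
      | some ec =>
        match PySem.List.pyGet? ec 0 with
        | none => s                             -- IndexError on i['ec'][0], caught
        | some e0 =>
          match s.1.get? e0 with
          | none => s                           -- .get → None, None.append raises, caught
          | some l => (s.1.insert e0 (l ++ [i]), s.2)
    else s

def pvAdddingGaCalls (gaCalls : List (List (String × List String))) :
    PySem.Dict String (List (List (String × List String))) :=
  (gaCalls.foldl pvAddStep (pvFormattingGaCalls gaCalls, false)).1

def pvTakingImportantProperties (org : PySem.Dict String (List (List (String × List String))))
    (inputEvent : String) (props : List String) : List (List (String × List String)) :=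
  match org.get? inputEvent with
  | none => []                                  -- KeyError; unreachable from gettingEventCalls
  | some calls =>
    calls.foldl (fun acc i =>
      acc ++ [(props.foldl (fun d p =>
          d.insert p (match pvDictGet i p with | some v => v | none => ["NA"]))
        PySem.Dict.empty).items]) []

def gettingEventCalls (gaCalls : List (List (String × List String))) (inputData : List (String × List String)) : List (String × List (List (String × List String))) :=
  ((inputData.foldl (fun (s : PySem.Dict String (List (List (String × List String))) × PySem.Dict String (List (List (String × List String)))) kv =>
      -- try: for i in organizedNetworkCalls[inputEvent]: pass  /  except: org[inputEvent] = []
      let org := if (s.1.get? kv.1).isSome then s.1 else s.1.insert kv.1 []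
      (org, s.2.insert kv.1 (pvTakingImportantProperties org kv.1 kv.2)))
    (pvAdddingGaCalls gaCalls, PySem.Dict.empty)).2).items

-- ===== PORT B =====

-- B's inner loop body for one input event; state = (matched rows so far, pageUsed)
def pvAltStep (inputEvent : String) (props : List String)
    (s : List (List (String × List String)) × Bool) (call : List (String × List String)) :
    List (List (String × List String)) × Bool :=
  -- first try/except: event category match
  let ok1 : Bool :=
    match pvDictGet call "t" with
    | none => false
    | some t =>
      if t = ["event"] then
        match pvDictGet call "ec" with
        | none => false
        | some ec =>
          match PySem.List.pyGet? ec 0 with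
          | none => false
          | some e0 => e0 = inputEvent
      else false
  -- second try/except: the first pageview-typed call, only for inputEvent 'pageview'
  let sw : Bool × Bool :=
    if ok1 then (true, s.2)
    else if inputEvent = "pageview" ∧ s.2 = false then
      match pvDictGet call "t" with
      | none => (false, s.2)
      | some t => if t = ["pageview"] then (true, true) else (false, s.2)
    else (false, s.2)
  if sw.1 then
    (s.1 ++ [(props.foldl (fun d p => d.insert p ((pvDictGet call p).getD ["NA"]))
               PySem.Dict.empty).items], sw.2)
  else (s.1, sw.2)

def gettingEventCalls_alt (gaCalls : List (List (String × List String))) (inputData : List (String × List String)) : List (String × List (List (String × List String))) :=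
  (inputData.foldl (fun ev kv =>
    ev.insert kv.1 (gaCalls.foldl (pvAltStep kv.1 kv.2) ([], false)).1)
    PySem.Dict.empty).items

-- ===== PRECONDITION & SPEC =====
def Spec_gettingEventCalls (gaCalls : List (List (String × List String))) (inputData : List (String × List String)) (out : List (String × List (List (String × List String)))) : Prop := out = gettingEventCalls_alt gaCalls inputData
instance (gaCalls : List (List (String × List String))) (inputData : List (String × List String)) (out : List (String × List (List (String × List String)))) : Decidable (Spec_gettingEventCalls gaCalls inputData out) := by unfold Spec_gettingEventCalls; infer_instance

-- ===== CLAIM (what is proved, stated in full; the proofs are below) =====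
def Claim_equal_gettingEventCalls : Prop := ∀ (gaCalls : List (List (String × List String))) (inputData : List (String × List String)), Dom_gettingEventCalls gaCalls inputData → Spec_gettingEventCalls gaCalls inputData (gettingEventCalls gaCalls inputData)

-- ===== LEMMAS AND PROOFS =====

-- event-category key of a call, exactly as both ports test it
def pvEvKey (i : List (String × List String)) : Option String :=
  match pvDictGet i "t" with
  | none => none
  | some t =>
    if t = ["event"] then
      match pvDictGet i "ec" with
      | none => none
      | some ec => PySem.List.pyGet? ec 0
    else none

-- the calls A's grouping stores under key k, in gaCalls order (done = pageDone flag)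
def pvMatched (k : String) : Bool → List (List (String × List String)) → List (List (String × List String))
  | _, [] => []
  | done, i :: r =>
    if pvDictGet i "t" = some ["pageview"] ∧ done = false then
      (if k = "pageview" then [i] else []) ++ pvMatched k true r
    else if pvEvKey i = some k then i :: pvMatched k done r
    else pvMatched k done r

-- one property row for call i
def pvRow (props : List String) (i : List (String × List String)) : List (String × List String) :=
  (props.foldl (fun d p => d.insert p ((pvDictGet i p).getD ["NA"])) PySem.Dict.empty).items

theorem pvEvKey_of_page (i : List (String × List String))
    (h : pvDictGet i "t" = some ["pageview"]) : pvEvKey i = none := by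
  simp [pvEvKey, h]

theorem pvMatched_done_irrel (k : String) (hk : k ≠ "pageview") :
    ∀ (xs : List (List (String × List String))) (d d' : Bool),
      pvMatched k d xs = pvMatched k d' xs := by
  intro xs
  induction xs with
  | nil => intro d d'; rfl
  | cons i r ih =>
    intro d d'
    by_cases hp : pvDictGet i "t" = some ["pageview"]
    · have he := pvEvKey_of_page i hp
      cases d <;> cases d' <;> simp [pvMatched, hp, he, hk]
    · by_cases he : pvEvKey i = some k <;>
        simp [pvMatched, hp, he, ih d d']

-- the formatting loop body, in terms of pvEvKey
theorem pvFmtStep_eq (fm : PySem.Dict String (List (List (String × List String))))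
    (i : List (String × List String)) :
    pvFmtStep fm i = (match pvEvKey i with
      | some e0 => fm.insert e0 []
      | none => fm) := by
  unfold pvFmtStep pvEvKey
  rcases ht : pvDictGet i "t" with _ | t
  · rfl
  · by_cases hevt : t = ["event"]
    · rcases he : pvDictGet i "ec" with _ | ec
      · simp [hevt]
      · rcases h0 : PySem.List.pyGet? ec 0 with _ | e0 <;> simp [hevt, h0]
    · simp [hevt]

theorem pvFormatting_contains_aux (k : String) :
    ∀ (xs : List (List (String × List String)))
      (fm : PySem.Dict String (List (List (String × List String)))),
      (xs.foldl pvFmtStep fm).contains k =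
        (fm.contains k || xs.any (fun i => pvEvKey i == some k)) := by
  intro xs
  induction xs with
  | nil => intro fm; simp
  | cons i r ih =>
    intro fm
    simp only [List.foldl_cons, List.any_cons, pvFmtStep_eq]
    rcases he : pvEvKey i with _ | e0
    · simp [ih]
    · simp only [ih, PySem.Dict.contains_insert]
      by_cases hk : k = e0
      · subst hk; simp [Bool.or_comm]
      · have h1 : (e0 == k) = false := by simp; exact fun h => hk h.symm
        have h2 : (k == e0) = false := by simp [hk]
        simp [h1, h2]

theorem pvFormatting_contains (gaCalls : List (List (String × List String))) (k : String) :
    (pvFormattingGaCalls gaCalls).contains k =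
      (k == "pageview" || gaCalls.any (fun i => pvEvKey i == some k)) := by
  unfold pvFormattingGaCalls
  rw [pvFormatting_contains_aux]
  have hmk : PySem.Dict.ofList [(("pageview" : String), ([] : List (List (String × List String))))]
      = PySem.Dict.mk [("pageview", [])] := rfl
  rw [hmk]
  by_cases hk : k = "pageview"
  · subst hk; simp
  · have h1 : ("pageview" == k) = false := by simp; exact fun h => hk h.symm
    have h2 : (k == "pageview") = false := by simp [hk]
    simp [h1, h2]

theorem pvFormatting_getD_aux (k : String) :
    ∀ (xs : List (List (String × List String)))
      (fm : PySem.Dict String (List (List (String × List String)))),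
      (∀ k', fm.getD k' [] = []) → (xs.foldl pvFmtStep fm).getD k [] = [] := by
  intro xs
  induction xs with
  | nil => intro fm h; simpa using h k
  | cons i r ih =>
    intro fm h
    simp only [List.foldl_cons, pvFmtStep_eq]
    rcases he : pvEvKey i with _ | e0
    · exact ih fm h
    · refine ih _ (fun k' => ?_)
      rw [PySem.Dict.getD_insert]
      split <;> simp [h]

theorem pvFormatting_getD (gaCalls : List (List (String × List String))) (k : String) :
    (pvFormattingGaCalls gaCalls).getD k [] = [] := by
  refine pvFormatting_getD_aux k gaCalls _ (fun k' => ?_)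
  have hmk : PySem.Dict.ofList [(("pageview" : String), ([] : List (List (String × List String))))]
      = PySem.Dict.mk [("pageview", [])] := rfl
  rw [hmk]
  by_cases hk : k' = "pageview"
  · subst hk; simp [PySem.Dict.getD, PySem.Dict.get?_mk_cons]
  · have h1 : ("pageview" == k') = false := by simp; exact fun h => hk h.symm
    simp [PySem.Dict.getD, PySem.Dict.get?, h1]

theorem pvAdd_aux :
    ∀ (xs : List (List (String × List String)))
      (fm : PySem.Dict String (List (List (String × List String)))) (done : Bool),
      fm.contains "pageview" = true →
      (∀ i ∈ xs, ∀ e0, pvEvKey i = some e0 → fm.contains e0 = true) →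
      (∀ k, (xs.foldl pvAddStep (fm, done)).1.getD k [] = fm.getD k [] ++ pvMatched k done xs) := by
  intro xs
  induction xs with
  | nil => intro fm done _ _ k; simp [pvMatched]
  | cons i r ih =>
    intro fm done hpv hev k
    have hevr : ∀ j ∈ r, ∀ e0, pvEvKey j = some e0 → fm.contains e0 = true :=
      fun j hj => hev j (List.mem_cons_of_mem _ hj)
    simp only [List.foldl_cons]
    rcases ht : pvDictGet i "t" with _ | t
    · have hstep : pvAddStep (fm, done) i = (fm, done) := by simp [pvAddStep, ht]
      have hm : pvMatched k done (i :: r) = pvMatched k done r := by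
        simp [pvMatched, pvEvKey, ht]
      rw [hstep, hm]; exact ih fm done hpv hevr k
    · by_cases hpg : t = ["pageview"]
      · subst hpg
        cases done with
        | false =>
          obtain ⟨l, hl⟩ : ∃ l, fm.get? "pageview" = some l := by
            rcases h : fm.get? "pageview" with _ | l
            · rw [PySem.Dict.contains_eq_isSome_get?, h] at hpv; simp at hpv
            · exact ⟨l, rfl⟩
          have hstep : pvAddStep (fm, false) i = (fm.insert "pageview" (l ++ [i]), true) := by
            simp [pvAddStep, ht, hl]
          rw [hstep]
          have hpv' : (fm.insert "pageview" (l ++ [i])).contains "pageview" = true := by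
            simp [PySem.Dict.contains_insert_self]
          have hev' : ∀ j ∈ r, ∀ e0, pvEvKey j = some e0 →
              (fm.insert "pageview" (l ++ [i])).contains e0 = true := by
            intro j hj e0 hje
            rw [PySem.Dict.contains_insert]
            simp [hevr j hj e0 hje]
          rw [ih _ true hpv' hev' k]
          have hm : pvMatched k false (i :: r)
              = (if k = "pageview" then [i] else []) ++ pvMatched k true r := by
            simp [pvMatched, ht]
          rw [hm]
          have hgl : fm.getD "pageview" [] = l := by
            rw [PySem.Dict.getD_eq_get?_getD, hl]; rfl
          by_cases hk : k = "pageview"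
          · subst hk; simp [hgl]
          · simp [PySem.Dict.getD_insert, hk]
        | true =>
          have hstep : pvAddStep (fm, true) i = (fm, true) := by
            simp [pvAddStep, ht]
          have hm : pvMatched k true (i :: r) = pvMatched k true r := by
            simp [pvMatched, pvEvKey, ht]
          rw [hstep, hm]; exact ih fm true hpv hevr k
      · by_cases hevt : t = ["event"]
        · subst hevt
          rcases hec : pvDictGet i "ec" with _ | ec
          · have hstep : pvAddStep (fm, done) i = (fm, done) := by
              simp [pvAddStep, ht, hec, hpg]
            have hm : pvMatched k done (i :: r) = pvMatched k done r := by
              simp [pvMatched, pvEvKey, ht, hec, hpg]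
            rw [hstep, hm]; exact ih fm done hpv hevr k
          · rcases h0 : PySem.List.pyGet? ec 0 with _ | e0
            · have hstep : pvAddStep (fm, done) i = (fm, done) := by
                simp [pvAddStep, ht, hec, h0, hpg]
              have hm : pvMatched k done (i :: r) = pvMatched k done r := by
                simp [pvMatched, pvEvKey, ht, hec, h0, hpg]
              rw [hstep, hm]; exact ih fm done hpv hevr k
            · have hkey : pvEvKey i = some e0 := by simp [pvEvKey, ht, hec, h0]
              have hc : fm.contains e0 = true := hev i (by simp) e0 hkey
              obtain ⟨l, hl⟩ : ∃ l, fm.get? e0 = some l := by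
                rcases h : fm.get? e0 with _ | l
                · rw [PySem.Dict.contains_eq_isSome_get?, h] at hc; simp at hc
                · exact ⟨l, rfl⟩
              have hstep : pvAddStep (fm, done) i = (fm.insert e0 (l ++ [i]), done) := by
                simp [pvAddStep, ht, hec, h0, hl, hpg]
              rw [hstep]
              have hpv' : (fm.insert e0 (l ++ [i])).contains "pageview" = true := by
                rw [PySem.Dict.contains_insert]; simp [hpv]
              have hev' : ∀ j ∈ r, ∀ e1, pvEvKey j = some e1 →
                  (fm.insert e0 (l ++ [i])).contains e1 = true := by
                intro j hj e1 hje
                rw [PySem.Dict.contains_insert]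
                simp [hevr j hj e1 hje]
              rw [ih _ done hpv' hev' k]
              have hm : pvMatched k done (i :: r)
                  = (if e0 = k then [i] else []) ++ pvMatched k done r := by
                simp only [pvMatched, ht, hkey]
                by_cases hk : e0 = k <;> simp [hk, hpg]
              rw [hm]
              have hgl : fm.getD e0 [] = l := by
                rw [PySem.Dict.getD_eq_get?_getD, hl]; rfl
              by_cases hk : e0 = k
              · subst hk; simp [hgl]
              · have hk' : ¬ k = e0 := fun h => hk h.symm
                simp [PySem.Dict.getD_insert, hk, hk']
        · have hstep : pvAddStep (fm, done) i = (fm, done) := by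
            simp [pvAddStep, ht, hpg, hevt]
          have hm : pvMatched k done (i :: r) = pvMatched k done r := by
            simp [pvMatched, pvEvKey, ht, hpg, hevt]
          rw [hstep, hm]; exact ih fm done hpv hevr k

theorem pvAddding_getD (gaCalls : List (List (String × List String))) (k : String) :
    (pvAdddingGaCalls gaCalls).getD k [] = pvMatched k false gaCalls := by
  unfold pvAdddingGaCalls
  rw [pvAdd_aux gaCalls (pvFormattingGaCalls gaCalls) false
      (by rw [pvFormatting_contains]; simp)
      (fun i hi e0 he => by
        rw [pvFormatting_contains]; simp only [Bool.or_eq_true, List.any_eq_true, beq_iff_eq]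
        exact Or.inr ⟨i, hi, he⟩) k,
    pvFormatting_getD]
  simp

theorem pvRowA_eq (props : List String) (i : List (String × List String)) :
    (props.foldl (fun d p =>
        d.insert p (match pvDictGet i p with | some v => v | none => ["NA"]))
      PySem.Dict.empty).items = pvRow props i := by
  unfold pvRow
  have hf : (fun (d : PySem.Dict String (List String)) p =>
        d.insert p (match pvDictGet i p with | some v => v | none => ["NA"]))
      = (fun (d : PySem.Dict String (List String)) p =>
        d.insert p ((pvDictGet i p).getD ["NA"])) := by
    funext d p; cases pvDictGet i p <;> rfl
  rw [hf]

theorem pvTaking_eq (org : PySem.Dict String (List (List (String × List String))))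
    (k : String) (props : List String) (h : (org.get? k).isSome) :
    pvTakingImportantProperties org k props = (org.getD k []).map (pvRow props) := by
  unfold pvTakingImportantProperties
  rcases h' : org.get? k with _ | calls
  · rw [h'] at h; simp at h
  · have hg : org.getD k [] = calls := by rw [PySem.Dict.getD_eq_get?_getD, h']; rfl
    simp only [hg]
    rw [PySem.List.foldl_append_singleton_eq_map]
    exact List.map_congr_left (fun i _ => pvRowA_eq props i)

theorem pvAltScan_aux (k : String) (props : List String) :
    ∀ (xs : List (List (String × List String)))
      (acc : List (List (String × List String))) (done : Bool),
      (xs.foldl (pvAltStep k props) (acc, done)).1 =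
        acc ++ (pvMatched k done xs).map (pvRow props) := by
  intro xs
  induction xs with
  | nil => intro acc done; simp [pvMatched]
  | cons i r ih =>
    intro acc done
    simp only [List.foldl_cons]
    rcases ht : pvDictGet i "t" with _ | t
    · have hstep : pvAltStep k props (acc, done) i = (acc, done) := by
        simp [pvAltStep, ht]
      have hm : pvMatched k done (i :: r) = pvMatched k done r := by
        simp [pvMatched, pvEvKey, ht]
      rw [hstep, hm]; exact ih acc done
    · by_cases hevt : t = ["event"]
      · subst hevt
        rcases hec : pvDictGet i "ec" with _ | ec
        · have hstep : pvAltStep k props (acc, done) i = (acc, done) := by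
            simp [pvAltStep, ht, hec]
          have hm : pvMatched k done (i :: r) = pvMatched k done r := by
            simp [pvMatched, pvEvKey, ht, hec]
          rw [hstep, hm]; exact ih acc done
        · rcases h0 : PySem.List.pyGet? ec 0 with _ | e0
          · have hstep : pvAltStep k props (acc, done) i = (acc, done) := by
              simp [pvAltStep, ht, hec, h0]
            have hm : pvMatched k done (i :: r) = pvMatched k done r := by
              simp [pvMatched, pvEvKey, ht, hec, h0]
            rw [hstep, hm]; exact ih acc done
          · have hkey : pvEvKey i = some e0 := by simp [pvEvKey, ht, hec, h0]
            by_cases hk : e0 = k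
            · subst hk
              have hstep : pvAltStep e0 props (acc, done) i = (acc ++ [pvRow props i], done) := by
                simp [pvAltStep, pvRow, ht, hec, h0]
              have hm : pvMatched e0 done (i :: r) = i :: pvMatched e0 done r := by
                simp [pvMatched, ht, hkey]
              rw [hstep, hm, List.map_cons, ih (acc ++ [pvRow props i]) done]
              simp
            · have hstep : pvAltStep k props (acc, done) i = (acc, done) := by
                simp [pvAltStep, ht, hec, h0, hk]
              have hm : pvMatched k done (i :: r) = pvMatched k done r := by
                simp [pvMatched, ht, hkey, hk]
              rw [hstep, hm]; exact ih acc done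
      · by_cases hpg : t = ["pageview"]
        · subst hpg
          have hkey := pvEvKey_of_page i ht
          by_cases hkp : k = "pageview"
          · subst hkp
            cases done with
            | false =>
              have hstep : pvAltStep "pageview" props (acc, false) i
                  = (acc ++ [pvRow props i], true) := by
                simp [pvAltStep, pvRow, ht]
              have hm : pvMatched "pageview" false (i :: r)
                  = i :: pvMatched "pageview" true r := by
                simp [pvMatched, ht]
              rw [hstep, hm, List.map_cons, ih (acc ++ [pvRow props i]) true]
              simp
            | true =>
              have hstep : pvAltStep "pageview" props (acc, true) i = (acc, true) := by
                simp [pvAltStep, ht]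
              have hm : pvMatched "pageview" true (i :: r) = pvMatched "pageview" true r := by
                simp [pvMatched, ht, hkey]
              rw [hstep, hm]; exact ih acc true
          · have hstep : pvAltStep k props (acc, done) i = (acc, done) := by
              simp [pvAltStep, ht, hkp]
            cases done with
            | false =>
              have hm : pvMatched k false (i :: r) = pvMatched k true r := by
                simp [pvMatched, ht, hkp]
              rw [hstep, hm, pvMatched_done_irrel k hkp r true false]
              exact ih acc false
            | true =>
              have hm : pvMatched k true (i :: r) = pvMatched k true r := by
                simp [pvMatched, ht, hkey]
              rw [hstep, hm]; exact ih acc true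
        · have hstep : pvAltStep k props (acc, done) i = (acc, done) := by
            simp [pvAltStep, ht, hevt, hpg]
          have hm : pvMatched k done (i :: r) = pvMatched k done r := by
            simp [pvMatched, pvEvKey, ht, hevt, hpg]
          rw [hstep, hm]; exact ih acc done

theorem pvMain_aux (gaCalls : List (List (String × List String))) :
    ∀ (inp : List (String × List String))
      (org ev : PySem.Dict String (List (List (String × List String)))),
      (∀ k, org.getD k [] = pvMatched k false gaCalls) →
      (inp.foldl (fun s kv =>
          let org' := if (s.1.get? kv.1).isSome then s.1 else s.1.insert kv.1 []
          (org', s.2.insert kv.1 (pvTakingImportantProperties org' kv.1 kv.2)))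
        (org, ev)).2 =
      inp.foldl (fun ev kv =>
        ev.insert kv.1 (gaCalls.foldl (pvAltStep kv.1 kv.2) ([], false)).1) ev := by
  intro inp
  induction inp with
  | nil => intro org ev _; simp
  | cons kv rest ih =>
    intro org ev h
    simp only [List.foldl_cons]
    have hval : pvTakingImportantProperties
        (if (org.get? kv.1).isSome then org else org.insert kv.1 []) kv.1 kv.2
        = (gaCalls.foldl (pvAltStep kv.1 kv.2) ([], false)).1 := by
      rw [pvAltScan_aux kv.1 kv.2 gaCalls [] false, List.nil_append]
      by_cases hs : (org.get? kv.1).isSome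
      · rw [if_pos hs, pvTaking_eq _ _ _ hs, h kv.1]
      · have h3 : org.get? kv.1 = none := by
          rcases hx : org.get? kv.1 with _ | v
          · rfl
          · rw [hx] at hs; simp at hs
        have h4 : pvMatched kv.1 false gaCalls = [] := by
          rw [← h kv.1, PySem.Dict.getD_eq_get?_getD, h3]
          rfl
        rw [if_neg hs, h4,
          pvTaking_eq _ _ _ (by rw [PySem.Dict.get?_insert_self]; rfl)]
        simp
    have hinv : ∀ k,
        (if (org.get? kv.1).isSome then org else org.insert kv.1 []).getD k []
          = pvMatched k false gaCalls := by
      intro k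
      by_cases hs : (org.get? kv.1).isSome
      · rw [if_pos hs]; exact h k
      · have h3 : org.get? kv.1 = none := by
          rcases hx : org.get? kv.1 with _ | v
          · rfl
          · rw [hx] at hs; simp at hs
        rw [if_neg hs, PySem.Dict.getD_insert]
        split
        · rename_i hkk
          subst hkk
          rw [← h kv.1, PySem.Dict.getD_eq_get?_getD, h3]
          rfl
        · exact h k
    rw [hval]
    exact ih _ _ hinv

-- ===== VERDICT (by name: the statement is the Claim_ definition above) =====
theorem gettingEventCalls_spec : Claim_equal_gettingEventCalls := by
  intro gaCalls inputData _
  unfold Spec_gettingEventCalls gettingEventCalls gettingEventCalls_alt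
  rw [pvMain_aux gaCalls inputData _ _ (fun k => pvAddding_getD gaCalls k)]
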